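-- pv_equiv track=rewrite | github.com/ChangKuoman/Mentoria-CS1111-2021-2 | s6/funciones.py | ejercicio
-- ===== SOURCE A (Python) =====
-- def ejercicio(num, num2=20): # valor por defeto num2=20
--
--     suma = 0
--     if num%3 == 0:
--         for i in range(num, num2):
--             if i%3==0: suma+=i
--     else:
--         for i in range(num, num2):
--             suma += i
--
--     return suma
-- ===== SOURCE B (Python) =====
-- def ejercicio(num, num2=20):
--     n = num2 - num
--     if n <= 0:
--         return 0
--     if num % 3 == 0:
--         k = (n + 2) // 3          # how many multiples of 3 in [num, num2)
--         return k * num + 3 * k * (k - 1) // 2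
--     return n * (2 * num + n - 1) // 2
-- ===== Notes on version B (the rewrite author's own statement) =====
-- stated objective: faster
-- what changed: replaced both summation loops by closed-form arithmetic-series formulas (Gauss sum; for the divisible branch, count of multiples of 3 plus a triangular-number formula)
import Mathlib
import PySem

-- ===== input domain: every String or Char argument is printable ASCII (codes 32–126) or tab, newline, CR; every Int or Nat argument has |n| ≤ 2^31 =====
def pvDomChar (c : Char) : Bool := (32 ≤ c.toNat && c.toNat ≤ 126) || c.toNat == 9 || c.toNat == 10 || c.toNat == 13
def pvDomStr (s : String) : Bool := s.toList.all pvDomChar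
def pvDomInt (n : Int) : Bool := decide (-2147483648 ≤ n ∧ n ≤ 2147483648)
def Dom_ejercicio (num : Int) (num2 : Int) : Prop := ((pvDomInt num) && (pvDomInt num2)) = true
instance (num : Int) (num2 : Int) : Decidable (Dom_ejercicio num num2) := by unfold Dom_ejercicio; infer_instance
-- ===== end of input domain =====

-- B replaces A's summation loops by O(1) closed-form arithmetic-series formulas.

-- ===== PORT A =====
def ejercicio (num : Int) (num2 : Int) : Int :=
  let suma : Int := 0
  if PySem.Int.mod num 3 == 0 then
    (PySem.List.pyRange num num2 1).foldl
      (fun suma i => if PySem.Int.mod i 3 == 0 then suma + i else suma) suma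
  else
    (PySem.List.pyRange num num2 1).foldl (fun suma i => suma + i) suma

-- ===== PORT B =====
def ejercicio_alt (num : Int) (num2 : Int) : Int :=
  let n := num2 - num
  if n ≤ 0 then 0
  else if PySem.Int.mod num 3 == 0 then
    let k := PySem.Int.floordiv (n + 2) 3
    k * num + PySem.Int.floordiv (3 * k * (k - 1)) 2
  else
    PySem.Int.floordiv (n * (2 * num + n - 1)) 2

-- ===== PRECONDITION & SPEC =====
def Spec_ejercicio (num : Int) (num2 : Int) (out : Int) : Prop := out = ejercicio_alt num num2
instance (num : Int) (num2 : Int) (out : Int) : Decidable (Spec_ejercicio num num2 out) := by unfold Spec_ejercicio; infer_instance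

-- ===== CLAIM (what is proved, stated in full; the proofs are below) =====
def Claim_equal_ejercicio : Prop := ∀ (num : Int) (num2 : Int), Dom_ejercicio num num2 → Spec_ejercicio num num2 (ejercicio num num2)

-- ===== LEMMAS AND PROOFS =====

-- Gauss: the plain summation loop, doubled to stay division-free.
lemma sumPlain (n : Nat) (a s : Int) :
    2 * ((PySem.List.pyRange a (a + n) 1).foldl (fun x i => x + i) s)
      = 2 * s + 2 * (n : Int) * a + (n : Int) * ((n : Int) - 1) := by
  induction n generalizing s with
  | zero =>
      rw [show a + ((0:Nat):Int) = a by push_cast; ring, PySem.List.pyRange_one_eq_nil (le_refl a)]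
      simp only [List.foldl_nil]; ring
  | succ m ih =>
      have hb : a + ((m + 1 : Nat) : Int) = (a + m) + 1 := by push_cast; ring
      rw [hb, PySem.List.pyRange_one_succ_right (by omega : a ≤ a + (m : Int)),
        List.foldl_append]
      simp only [List.foldl_cons, List.foldl_nil]
      have h := ih s
      push_cast at h ⊢
      linarith [h]

-- The filtered loop, for 3 ∣ a, stepping three at a time from the left.
lemma sumMult : ∀ (n : Nat) (a s : Int), 3 ∣ a →
    2 * ((PySem.List.pyRange a (a + n) 1).foldl
        (fun x i => if PySem.Int.mod i 3 == 0 then x + i else x) s)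
      = 2 * s + 2 * (((n + 2) / 3 : Nat) : Int) * a
        + 3 * (((n + 2) / 3 : Nat) : Int) * ((((n + 2) / 3 : Nat) : Int) - 1) := by
  intro n
  induction n using Nat.strong_induction_on with
  | _ n ih =>
    intro a s ha
    have h0 : (PySem.Int.mod a 3 == 0) = true := by
      simp [ha]
    have h1 : (PySem.Int.mod (a + 1) 3 == 0) = true → False := by
      simp; omega
    have h2 : (PySem.Int.mod (a + 1 + 1) 3 == 0) = true → False := by
      simp; omega
    match n with
    | 0 =>
        rw [show a + ((0:Nat):Int) = a by push_cast; ring, PySem.List.pyRange_one_eq_nil (le_refl a)]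
        simp only [List.foldl_nil]; norm_num
    | 1 =>
        rw [show a + ((1 : Nat) : Int) = a + 1 by push_cast; ring,
          PySem.List.pyRange_one_cons (by omega), PySem.List.pyRange_one_eq_nil (by omega)]
        simp only [List.foldl_cons, List.foldl_nil, h0, if_true]
        norm_num; ring
    | 2 =>
        rw [show a + ((2 : Nat) : Int) = a + 2 by push_cast; ring,
          PySem.List.pyRange_one_cons (by omega), PySem.List.pyRange_one_cons (by omega),
          PySem.List.pyRange_one_eq_nil (by omega)]
        simp only [List.foldl_cons, List.foldl_nil, h0, if_true]
        rw [if_neg (by intro h; exact h1 h)]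
        norm_num; ring
    | (m + 3) =>
        have hsplit : PySem.List.pyRange a (a + ((m + 3 : Nat) : Int)) 1
            = PySem.List.pyRange a (a + 3) 1 ++ PySem.List.pyRange (a + 3) (a + ((m + 3 : Nat) : Int)) 1 :=
          PySem.List.pyRange_one_append a (a + 3) _ (by omega) (by push_cast; omega)
        have hfirst : PySem.List.pyRange a (a + 3) 1 = [a, a + 1, a + 1 + 1] := by
          rw [PySem.List.pyRange_one_cons (by omega), PySem.List.pyRange_one_cons (by omega),
            PySem.List.pyRange_one_cons (by omega), PySem.List.pyRange_one_eq_nil (by omega)]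
        rw [hsplit, List.foldl_append, hfirst]
        simp only [List.foldl_cons, List.foldl_nil, h0, if_true]
        rw [if_neg (by intro h; exact h2 h), if_neg (by intro h; exact h1 h)]
        have htail : a + ((m + 3 : Nat) : Int) = (a + 3) + ((m : Nat) : Int) := by push_cast; ring
        rw [htail, ih m (by omega) (a + 3) (s + a) (by omega)]
        have hk : ((m + 3 + 2) / 3 : Nat) = (m + 2) / 3 + 1 := by omega
        rw [hk]; push_cast; ring

-- 3*k*(k-1) is even (k*(k-1) is a product of consecutive integers).
lemma even_3kk (k : Int) : 2 ∣ 3 * k * (k - 1) := by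
  have h : Even ((k - 1) * (k - 1 + 1)) := Int.even_mul_succ_self (k - 1)
  have h2 : 2 ∣ (k - 1) * k := by
    simpa [sub_add_cancel] using h.two_dvd
  obtain ⟨t, ht⟩ := h2
  exact ⟨3 * t, by linarith [ht]⟩

-- doubling a floor division of an even number recovers the number
lemma two_mul_floordiv_even (x : Int) (hx : 2 ∣ x) :
    2 * PySem.Int.floordiv x 2 = x := by
  have h := PySem.Int.floordiv_mul_add_mod x 2
  have hm : PySem.Int.mod x 2 = 0 := (PySem.Int.mod_eq_zero_iff_dvd x 2).2 hx
  omega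

-- ===== VERDICT (by name: the statement is the Claim_ definition above) =====
theorem ejercicio_spec : Claim_equal_ejercicio := by
  intro num num2 _
  unfold Spec_ejercicio ejercicio ejercicio_alt
  by_cases hle : num2 - num ≤ 0
  · rw [PySem.List.pyRange_one_eq_nil (by omega)]
    simp [hle]
  · have hn : num2 = num + ((num2 - num).toNat : Int) := by omega
    set n : Nat := (num2 - num).toNat with hndef
    by_cases hdvd : (3 : Int) ∣ num
    · have hmod : (PySem.Int.mod num 3 == 0) = true := by
        simp [hdvd]
      simp only [hmod, if_true, if_neg hle]
      have hsum := sumMult n num 0 hdvd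
      rw [← hn] at hsum
      have hk : PySem.Int.floordiv (num2 - num + 2) 3 = (((n + 2) / 3 : Nat) : Int) := by
        have : num2 - num + 2 = ((n + 2 : Nat) : Int) := by push_cast; omega
        rw [this]; exact_mod_cast PySem.Int.floordiv_natCast (n + 2) 3
      rw [hk]
      set k : Int := (((n + 2) / 3 : Nat) : Int)
      have hfd := two_mul_floordiv_even (3 * k * (k - 1)) (even_3kk k)
      linarith [hsum, hfd]
    · have hmod : (PySem.Int.mod num 3 == 0) = false := by
        simp [hdvd]
      simp only [hmod, Bool.false_eq_true, if_false, if_neg hle]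
      have hsum := sumPlain n num 0
      rw [← hn] at hsum
      have heven : 2 ∣ (num2 - num) * (2 * num + (num2 - num) - 1) := by
        have h : Even ((num2 - num - 1) * (num2 - num - 1 + 1)) :=
          Int.even_mul_succ_self (num2 - num - 1)
        have h2 : 2 ∣ (num2 - num - 1) * (num2 - num) := by
          simpa [sub_add_cancel] using h.two_dvd
        obtain ⟨t, ht⟩ := h2
        exact ⟨(num2 - num) * num + t, by linarith [ht]⟩
      have hfd := two_mul_floordiv_even _ heven
      have hcast : ((n : Int)) = num2 - num := by omega
      rw [hcast] at hsum
      nlinarith [hsum, hfd]
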